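-- pv_equiv track=rewrite | github.com/supasuge/CTF-Archive | 2048ai-solve.py | calculate_smoothness
-- ===== SOURCE A (Python) =====
-- def calculate_smoothness(board):
--     """Calculate smoothness of the board (penalize large differences between adjacent tiles)."""
--     smoothness = 0
--     size = len(board)
--     for i in range(size):
--         for j in range(size):
--             if board[i][j] != 0:
--                 value = board[i][j]
--                 # Check right neighbor
--                 if j + 1 < size and board[i][j + 1] != 0:
--                     smoothness += abs(value - board[i][j + 1])
--                 # Check bottom neighbor
--                 if i + 1 < size and board[i + 1][j] != 0:
--                     smoothness += abs(value - board[i + 1][j])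
--     return smoothness
-- ===== SOURCE B (Python) =====
-- def calculate_smoothness(board):
--     """Calculate smoothness of the board (penalize large differences between adjacent tiles)."""
--     size = len(board)
--     rows = [[row[j] for j in range(size)] for row in board]
--     cols = [list(c) for c in zip(*rows)]
--
--     def line(seq):
--         return sum(abs(a - b) for a, b in zip(seq, seq[1:]) if a != 0 and b != 0)
--
--     return sum(map(line, rows)) + sum(map(line, cols))
-- ===== Notes on version B (the rewrite author's own statement) =====
-- stated objective: alternative
-- what changed: Replaced A's index-based fused scan by a data-level decomposition: gather the leading size-by-size sub-board, build the columns explicitly by transposition (zip(*rows)), and sum a single pairwise helper line(seq) over zip(seq, seq[1:]) applied once to every row and once to every column; no neighbor bounds checks remain.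
import Mathlib
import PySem

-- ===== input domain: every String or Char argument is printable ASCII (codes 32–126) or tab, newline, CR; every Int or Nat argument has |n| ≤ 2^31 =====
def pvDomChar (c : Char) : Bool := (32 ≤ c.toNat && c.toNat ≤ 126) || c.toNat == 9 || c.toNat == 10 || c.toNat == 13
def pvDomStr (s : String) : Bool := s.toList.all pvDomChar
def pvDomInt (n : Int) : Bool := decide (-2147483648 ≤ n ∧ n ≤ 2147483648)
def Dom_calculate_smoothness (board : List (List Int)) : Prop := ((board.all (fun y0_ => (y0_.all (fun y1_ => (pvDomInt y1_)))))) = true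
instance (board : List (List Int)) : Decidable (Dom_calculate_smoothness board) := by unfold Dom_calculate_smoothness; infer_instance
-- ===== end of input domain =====

-- B replaces A's fused index scan by a data-level decomposition: gather the leading size-by-size
-- sub-board, transpose to explicit columns, and apply one pairwise zip-based helper to every row
-- and column; equivalence only, no speed claim.

-- ===== PORT A =====
def calculate_smoothness (board : List (List Int)) : Int :=
  let size : Int := board.length
  (PySem.List.pyRange 0 size 1).foldl (fun smoothness i =>
    (PySem.List.pyRange 0 size 1).foldl (fun smoothness j =>
      if PySem.List.pyGetD (PySem.List.pyGetD board i []) j 0 ≠ 0 then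
        let value := PySem.List.pyGetD (PySem.List.pyGetD board i []) j 0
        let s1 := if j + 1 < size ∧ PySem.List.pyGetD (PySem.List.pyGetD board i []) (j + 1) 0 ≠ 0
          then smoothness + |value - PySem.List.pyGetD (PySem.List.pyGetD board i []) (j + 1) 0|
          else smoothness
        if i + 1 < size ∧ PySem.List.pyGetD (PySem.List.pyGetD board (i + 1) []) j 0 ≠ 0
          then s1 + |value - PySem.List.pyGetD (PySem.List.pyGetD board (i + 1) []) j 0|
          else s1
      else smoothness) smoothness) 0

-- ===== PORT B =====
-- line(seq) = sum(abs(a-b) for a,b in zip(seq, seq[1:]) if a != 0 and b != 0)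
def pvLine (seq : List Int) : Int :=
  (seq.zip (PySem.List.slice seq (some 1) none)).foldl
    (fun a p => if p.1 ≠ 0 ∧ p.2 ≠ 0 then a + |p.1 - p.2| else a) 0

-- hand port of Python zip(*rows) for a list of lists (exact: stops at the shortest row,
-- empty when rows is empty); the fuel is only a structural bound, never reached before the guard
def pyZipStarGo : Nat  →  List (List Int)  →  List (List Int)
  | 0, _ => []
  | Nat.succ fuel, rows =>
    if rows.isEmpty || rows.any (fun r => r.isEmpty) then []
    else (rows.map (fun r => r.headD 0)) :: pyZipStarGo fuel (rows.map (fun r => r.drop 1))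

def pyZipStar (rows : List (List Int)) : List (List Int) :=
  pyZipStarGo ((rows.headD []).length + 1) rows

def calculate_smoothness_alt (board : List (List Int)) : Int :=
  let size : Int := board.length
  let rows := board.map (fun row =>
    (PySem.List.pyRange 0 size 1).map (fun j => PySem.List.pyGetD row j 0))
  let cols := pyZipStar rows
  rows.foldl (fun a r => a + pvLine r) 0 + cols.foldl (fun a c => a + pvLine c) 0

-- ===== PRECONDITION & SPEC =====
-- Pre_ excludes boards where some row is shorter than the number of rows: there A raises IndexError.
def Pre_calculate_smoothness (board : List (List Int)) : Prop :=
  ∀ row ∈ board, board.length ≤ row.length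

instance (board : List (List Int)) : Decidable (Pre_calculate_smoothness board) := by
  unfold Pre_calculate_smoothness; infer_instance

def pvWitness_calculate_smoothness : List (List Int) := [[2, 0], [4, 8]]

def Spec_calculate_smoothness (board : List (List Int)) (out : Int) : Prop := out = calculate_smoothness_alt board
instance (board : List (List Int)) (out : Int) : Decidable (Spec_calculate_smoothness board out) := by unfold Spec_calculate_smoothness; infer_instance

-- ===== CLAIM (what is proved, stated in full; the proofs are below) =====
def Claim_equal_calculate_smoothness : Prop := ∀ (board : List (List Int)), Dom_calculate_smoothness board → Pre_calculate_smoothness board → Spec_calculate_smoothness board (calculate_smoothness board)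

-- ===== LEMMAS AND PROOFS =====

-- cell (i,j) of the board, with Int (resp. Nat) indices, 0-defaulted (in range under Pre_ whenever used)
def pvGI (b : List (List Int)) (i j : Int) : Int := PySem.List.pyGetD (PySem.List.pyGetD b i []) j 0

def pvG (b : List (List Int)) (i j : Nat) : Int := (b.getD i []).getD j 0

-- horizontal contribution of cell (i,j)
def pvH (b : List (List Int)) (i j : Nat) : Int :=
  if j + 1 < b.length ∧ pvG b i j ≠ 0 ∧ pvG b i (j + 1) ≠ 0 then |pvG b i j - pvG b i (j + 1)| else 0

-- vertical contribution of cell (i,j)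
def pvV (b : List (List Int)) (i j : Nat) : Int :=
  if i + 1 < b.length ∧ pvG b i j ≠ 0 ∧ pvG b (i + 1) j ≠ 0 then |pvG b i j - pvG b (i + 1) j| else 0

-- A's per-cell contribution with Int indices
def pvTA (b : List (List Int)) (i j : Int) : Int :=
  (if (j + 1 < (b.length : Int) ∧ pvGI b i (j + 1) ≠ 0) ∧ pvGI b i j ≠ 0
    then |pvGI b i j - pvGI b i (j + 1)| else 0)
  + (if (i + 1 < (b.length : Int) ∧ pvGI b (i + 1) j ≠ 0) ∧ pvGI b i j ≠ 0
    then |pvGI b i j - pvGI b (i + 1) j| else 0)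

-- A's loop body (an abstract if-shape) adds exactly the per-cell term
theorem pv_body_abs {P Q : Prop} [Decidable P] [Decidable Q] (g acc v1 v2 : Int) :
    (if g ≠ 0 then
      (if Q then (if P then acc + v1 else acc) + v2 else (if P then acc + v1 else acc))
     else acc)
    = acc + ((if P ∧ g ≠ 0 then v1 else 0) + (if Q ∧ g ≠ 0 then v2 else 0)) := by
  by_cases hg : g = 0 <;> by_cases hP : P <;> by_cases hQ : Q <;> simp [hg, hP, hQ] <;> ring

theorem pv_foldl_eq_add_sum {α : Type} (t : α → Int) :
    ∀ (l : List α) (f : Int → α → Int), (∀ acc x, f acc x = acc + t x) →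
      ∀ (a : Int), l.foldl f a = a + (l.map t).sum := by
  intro l
  induction l with
  | nil => intro f h a; simp
  | cons x xs ih =>
    intro f h a
    simp only [List.foldl_cons, List.map_cons, List.sum_cons, ih f h, h a x]
    ring

theorem pv_sum_list_range (n : Nat) (f : Nat → Int) :
    ((List.range n).map f).sum = ∑ k ∈ Finset.range n, f k := by
  induction n with
  | zero => simp
  | succ m ih => rw [List.range_succ, List.map_append, List.sum_append, Finset.sum_range_succ, ih]; simp

theorem pv_range_cast (n : Nat) :
    PySem.List.pyRange 0 (n : Int) 1 = (List.range n).map (fun k : Nat => (k : Int)) :=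
  PySem.List.pyRange_zero_natCast n

theorem pvGI_cast (b : List (List Int)) (i j : Nat) : pvGI b (i : Int) (j : Int) = pvG b i j := by
  simp [pvGI, pvG]

theorem pvTA_cast (b : List (List Int)) (i j : Nat) :
    pvTA b (i : Int) (j : Int) = pvH b i j + pvV b i j := by
  have hj : ((j : Int) + 1) = ((j + 1 : Nat) : Int) := by push_cast; ring
  have hi : ((i : Int) + 1) = ((i + 1 : Nat) : Int) := by push_cast; ring
  simp only [pvTA, pvH, pvV, hj, hi, pvGI_cast, Nat.cast_lt]
  congr 1
  · exact if_congr (by tauto) rfl rfl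
  · exact if_congr (by tauto) rfl rfl

theorem pv_A_eq (b : List (List Int)) :
    calculate_smoothness b
      = ∑ i ∈ Finset.range b.length, ∑ j ∈ Finset.range b.length, (pvH b i j + pvV b i j) := by
  unfold calculate_smoothness
  dsimp only
  rw [pv_range_cast, List.foldl_map]
  rw [pv_foldl_eq_add_sum
      (fun iN : Nat => ((List.range b.length).map (fun jN : Nat => pvTA b iN jN)).sum)
      _ _ (fun acc iN => by
        rw [List.foldl_map]
        rw [pv_foldl_eq_add_sum (fun jN : Nat => pvTA b iN jN) _ _
          (fun acc2 jN => by
            simp only [pvTA, pvGI]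
            exact pv_body_abs _ _ _ _)])]
  rw [zero_add, pv_sum_list_range]
  refine Finset.sum_congr rfl fun i _ => ?_
  rw [pv_sum_list_range]
  exact Finset.sum_congr rfl fun j _ => pvTA_cast b i j

-- the pairwise term of pvLine at position j of seq
def pvLT (seq : List Int) (j : Nat) : Int :=
  if seq.getD j 0 ≠ 0 ∧ seq.getD (j + 1) 0 ≠ 0 then |seq.getD j 0 - seq.getD (j + 1) 0| else 0

theorem pvLine_eq (seq : List Int) :
    pvLine seq = ∑ j ∈ Finset.range (seq.length - 1), pvLT seq j := by
  unfold pvLine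
  rw [PySem.List.slice_from_one]
  rw [pv_foldl_eq_add_sum (fun p : Int × Int => if p.1 ≠ 0 ∧ p.2 ≠ 0 then |p.1 - p.2| else 0)
      _ _ (fun acc p => by by_cases h : p.1 ≠ 0 ∧ p.2 ≠ 0 <;> simp [h])]
  rw [zero_add]
  have hmap : (seq.zip seq.tail).map (fun p : Int × Int => if p.1 ≠ 0 ∧ p.2 ≠ 0 then |p.1 - p.2| else 0)
      = (List.range (seq.length - 1)).map (pvLT seq) := by
    apply List.ext_getElem
    · simp only [List.length_map, List.length_zip, List.length_tail, List.length_range]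
      omega
    · intro j h1 h2
      simp only [List.getElem_map, List.getElem_zip, List.getElem_range, List.getElem_tail]
      have hj : j < seq.length := by simp at h1; omega
      have hj2 : j + 1 < seq.length := by simp at h1; omega
      simp [pvLT, List.getD, List.getElem?_eq_getElem hj, List.getElem?_eq_getElem hj2]
  rw [hmap, pv_sum_list_range]

-- pyZipStar on nonempty, equal-length rows is the index-wise transpose
theorem pyZipStarGo_eq (m : Nat) : ∀ (fuel : Nat) (rows : List (List Int)), m < fuel →
    rows ≠ [] → (∀ r ∈ rows, r.length = m) →
    pyZipStarGo fuel rows = (List.range m).map (fun k => rows.map (fun r => r.getD k 0)) := by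
  induction m with
  | zero =>
    intro fuel rows hf hne hlen
    obtain ⟨f, rfl⟩ : ∃ f, fuel = f + 1 := ⟨fuel - 1, by omega⟩
    obtain ⟨r, rs, rfl⟩ := List.exists_cons_of_ne_nil hne
    have : r = [] := List.eq_nil_of_length_eq_zero (hlen r (by simp))
    simp [pyZipStarGo, this]
  | succ m ih =>
    intro fuel rows hf hne hlen
    obtain ⟨f, rfl⟩ : ∃ f, fuel = f + 1 := ⟨fuel - 1, by omega⟩
    have hguard : (rows.isEmpty || rows.any (fun r => r.isEmpty)) = false := by
      simp only [Bool.or_eq_false_iff, List.any_eq_false]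
      refine ⟨by simpa [List.isEmpty_iff] using hne, fun r hr => ?_⟩
      have := hlen r hr
      simp only [List.isEmpty_iff]
      intro he
      simp [he] at this
    have hdrop : ∀ r ∈ rows.map (fun r => r.drop 1), r.length = m := by
      intro r hr
      obtain ⟨r0, hr0, rfl⟩ := List.mem_map.mp hr
      have := hlen r0 hr0
      simp
      omega
    have hdne : rows.map (fun r => (r.drop 1 : List Int)) ≠ [] := by simpa using hne
    rw [pyZipStarGo, hguard]
    simp only [Bool.false_eq_true, if_false]
    rw [ih f _ (by omega) hdne hdrop]
    rw [List.range_succ_eq_map, List.map_cons, List.map_map]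
    congr 1
    · apply List.map_congr_left
      intro r _
      cases r <;> rfl
    · apply List.map_congr_left
      intro k _
      simp only [Function.comp, List.map_map]
      apply List.map_congr_left
      intro r _
      cases r <;> simp [List.getD]

theorem pyZipStar_eq (m : Nat) (rows : List (List Int)) (hne : rows ≠ [])
    (hlen : ∀ r ∈ rows, r.length = m) :
    pyZipStar rows = (List.range m).map (fun k => rows.map (fun r => r.getD k 0)) := by
  unfold pyZipStar
  apply pyZipStarGo_eq m _ _ _ hne hlen
  obtain ⟨r, rs, rfl⟩ := List.exists_cons_of_ne_nil hne
  have := hlen r (by simp)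
  simp [this]

-- (l.map f).sum as a sum over indices
theorem pv_map_sum {α : Type} (l : List α) (d : α) (f : α → Int) :
    (l.map f).sum = ∑ i ∈ Finset.range l.length, f (l.getD i d) := by
  rw [← pv_sum_list_range]
  congr 1
  apply List.ext_getElem
  · simp
  · intro i h1 h2
    simp only [List.length_map] at h1
    simp [List.getD, List.getElem?_eq_getElem h1]

-- getD through map, in range
theorem pv_getD_map {α β : Type} (l : List α) (f : α → β) (dα : α) (dβ : β) (i : Nat)
    (h : i < l.length) : (l.map f).getD i dβ = f (l.getD i dα) := by
  simp [List.getD, List.getElem?_eq_getElem (show i < (l.map f).length by simpa),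
    List.getElem?_eq_getElem h]

-- getD of a range-map, in range
theorem pv_getD_rangemap (g : Nat → Int) (n j : Nat) (hj : j < n) :
    ((List.range n).map g).getD j 0 = g j := by
  simp [List.getD, List.getElem?_eq_getElem (show j < ((List.range n).map g).length by simpa)]

-- B as the same double sums as A's characterisation
theorem pv_B_eq (b : List (List Int)) (hpre : ∀ row ∈ b, b.length ≤ row.length) :
    calculate_smoothness_alt b
      = (∑ i ∈ Finset.range b.length, ∑ j ∈ Finset.range (b.length - 1), pvH b i j)
        + (∑ k ∈ Finset.range b.length, ∑ i ∈ Finset.range (b.length - 1), pvV b i k) := by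
  unfold calculate_smoothness_alt
  dsimp only
  simp only [pv_range_cast, List.map_map, Function.comp_def,
    PySem.List.pyGetD_natCast]
  rw [pv_foldl_eq_add_sum pvLine _ _ (fun acc r => rfl),
      pv_foldl_eq_add_sum pvLine _ _ (fun acc r => rfl), zero_add, zero_add]
  by_cases hb : b = []
  · subst hb
    simp [pyZipStar, pyZipStarGo]
  · have hlen : ∀ r ∈ b.map (fun row => (List.range b.length).map (fun j => row.getD j 0)),
        r.length = b.length := by
      intro r hr
      obtain ⟨row, hrow, rfl⟩ := List.mem_map.mp hr
      simp
    have hne : b.map (fun row => ((List.range b.length).map (fun j => row.getD j 0) : List Int))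
        ≠ [] := by simpa using hb
    congr 1
    · -- horizontal pass: one pvLine per gathered row
      rw [List.map_map, pv_map_sum b [] _]
      refine Finset.sum_congr rfl fun i hi => ?_
      simp only [Function.comp]
      rw [pvLine_eq]
      have hlen' : ((List.range b.length).map (fun j => (b.getD i []).getD j 0)).length
          = b.length := by simp
      rw [hlen']
      refine Finset.sum_congr rfl fun j hj => ?_
      have hj' : j < b.length - 1 := Finset.mem_range.mp hj
      unfold pvLT pvH pvG
      rw [pv_getD_rangemap _ _ _ (by omega), pv_getD_rangemap _ _ _ (by omega)]
      simp [show j + 1 < b.length by omega]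
    · -- vertical pass: one pvLine per transposed column
      rw [pyZipStar_eq b.length _ hne hlen, List.map_map, pv_sum_list_range]
      refine Finset.sum_congr rfl fun k hk => ?_
      have hk' : k < b.length := Finset.mem_range.mp hk
      simp only [Function.comp]
      have hcol : ∀ i' : Nat, i' < b.length →
          ((b.map (fun row => (List.range b.length).map (fun j => row.getD j 0))).map
            (fun r => r.getD k 0)).getD i' 0 = pvG b i' k := by
        intro i' h
        rw [pv_getD_map _ _ [] _ _ (by simpa using h),
            pv_getD_map _ _ [] _ _ (by simpa using h),
            pv_getD_rangemap _ _ _ hk']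
        rfl
      rw [pvLine_eq]
      have hcl : ((b.map (fun row => (List.range b.length).map (fun j => row.getD j 0))).map
          (fun r => r.getD k 0)).length = b.length := by simp
      rw [hcl]
      refine Finset.sum_congr rfl fun i hi => ?_
      have hi' : i < b.length - 1 := Finset.mem_range.mp hi
      unfold pvLT pvV
      rw [hcol i (by omega), hcol (i + 1) (by omega)]
      simp [show i + 1 < b.length by omega]

theorem pv_H_last (b : List (List Int)) (i : Nat) :
    ∑ j ∈ Finset.range b.length, pvH b i j = ∑ j ∈ Finset.range (b.length - 1), pvH b i j := by
  cases hN : b.length with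
  | zero => simp
  | succ m =>
    rw [Finset.sum_range_succ]
    have : pvH b i m = 0 := by
      unfold pvH
      rw [hN]
      simp
    simp [this]

theorem pv_V_last (b : List (List Int)) (j : Nat) :
    ∑ i ∈ Finset.range b.length, pvV b i j = ∑ i ∈ Finset.range (b.length - 1), pvV b i j := by
  cases hN : b.length with
  | zero => simp
  | succ m =>
    rw [Finset.sum_range_succ]
    have : pvV b m j = 0 := by
      unfold pvV
      rw [hN]
      simp
    simp [this]

-- ===== VERDICT (by name: the statement is the Claim_ definition above) =====
theorem calculate_smoothness_spec : Claim_equal_calculate_smoothness := by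
  intro board _ hpre
  unfold Spec_calculate_smoothness
  rw [pv_A_eq, pv_B_eq board hpre]
  simp only [Finset.sum_add_distrib]
  congr 1
  · exact Finset.sum_congr rfl fun i _ => pv_H_last board i
  · rw [Finset.sum_comm]
    exact Finset.sum_congr rfl fun j _ => pv_V_last board j
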